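-- pv_equiv track=rewrite | github.com/iiko38/3d-model-extraction-webapp | populate_url_columns.py | build_family_directory
-- ===== SOURCE A (Python) =====
-- def get_furniture_types():
--     """Return set of furniture type keywords for head noun detection."""
--     return {
--         'chair', 'sofa', 'table', 'stool', 'bench', 'desk',
--         'screen', 'pod', 'storage', 'cabinet', 'shelf'
--     }
--
-- def should_pluralize(head_noun):
--     """Determine if family should be pluralized."""
--     # Based on actual CDN structure, most families ARE pluralized
--     pluralize_types = {'chair', 'sofa', 'stool', 'bench', 'table'}
--     return head_noun in pluralize_types
--
-- def build_family_directory(tokens):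
--     """Build family directory with improved logic."""
--     furniture_types = get_furniture_types()
--
--     # Special case mappings for known families
--     special_families = {
--         'eames_molded_plastic_armchair': 'eames_molded_plastic_chairs',
--         'motia_sit_to_stand_table': 'motia_sit_to_stand_tables',
--         'aeron_chair': 'aeron_chairs',
--         'leeway_stool': 'leeway_stools'
--     }
--
--     # Check if we have a known special case
--     for i in range(len(tokens)):
--         for j in range(i+1, len(tokens)+1):
--             test_family = '_'.join(tokens[i:j])
--             if test_family in special_families:
--                 return special_families[test_family]
--
--     # Look for furniture type in tokens
--     head_noun_index = -1
--     for i, token in enumerate(tokens):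
--         if token in furniture_types:
--             head_noun_index = i
--             break
--
--     # If no furniture type found, look for compound patterns
--     if head_noun_index == -1:
--         # Check for compound patterns like "sit_to_stand_tables"
--         for i in range(len(tokens) - 2):
--             if (tokens[i] == 'sit' and tokens[i+1] == 'to' and
--                 tokens[i+2] in ['stand', 'sit']):
--                 head_noun_index = i + 2
--                 break
--
--     # Fallback to second token if still not found
--     if head_noun_index == -1:
--         head_noun_index = min(1, len(tokens) - 1)
--
--     # Build family directory
--     family_tokens = tokens[:head_noun_index + 1]
--     family = '_'.join(family_tokens)
--
--     # Pluralize if needed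
--     head_noun = tokens[head_noun_index]
--     if should_pluralize(head_noun):
--         family = family + 's'
--
--     return family
-- ===== SOURCE B (Python) =====
-- def build_family_directory(tokens):
--     """Build family directory: special-family scan capped at the longest key, then one forward pass."""
--     SPECIAL = {
--         'eames_molded_plastic_armchair': 'eames_molded_plastic_chairs',
--         'motia_sit_to_stand_table': 'motia_sit_to_stand_tables',
--         'aeron_chair': 'aeron_chairs',
--         'leeway_stool': 'leeway_stools',
--     }
--     MAXLEN = 29  # longest special key; longer joins can never match
--     PLURAL = {'chair', 'sofa', 'stool', 'bench', 'table'}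
--     FURN = PLURAL | {'desk', 'screen', 'pod', 'storage', 'cabinet', 'shelf'}
--     n = len(tokens)
--
--     # special families: grow each window incrementally, stop once it is too long to match
--     for i in range(n):
--         joined = tokens[i]
--         j = i + 1
--         while True:
--             if joined in SPECIAL:
--                 return SPECIAL[joined]
--             if j >= n or len(joined) >= MAXLEN:
--                 break
--             joined = joined + '_' + tokens[j]
--             j += 1
--
--     # single forward pass: build the joined prefix while hunting the head noun
--     joined = None
--     for t in tokens:
--         joined = t if joined is None else joined + '_' + t
--         if t in FURN:
--             return joined + 's' if t in PLURAL else joined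
--
--     # compound pattern 'sit to stand/sit': head noun is never pluralized
--     for i in range(n - 2):
--         if tokens[i] == 'sit' and tokens[i + 1] == 'to' and tokens[i + 2] in ('stand', 'sit'):
--             return '_'.join(tokens[:i + 3])
--
--     # fallback: first two tokens (or the single token)
--     k = min(2, n)
--     fam = '_'.join(tokens[:k])
--     return fam + 's' if tokens[k - 1] in PLURAL else fam
-- ===== Notes on version B (the rewrite author's own statement) =====
-- stated objective: faster
-- what changed: The special-family search no longer joins every O(n^2) token window (each join O(n)): each window is grown incrementally and abandoned once its length reaches the longest special key (29 chars), so the scan is O(n); the head-noun pass then builds the joined prefix while scanning and returns early instead of computing an index and re-joining a slice.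
import Mathlib
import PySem

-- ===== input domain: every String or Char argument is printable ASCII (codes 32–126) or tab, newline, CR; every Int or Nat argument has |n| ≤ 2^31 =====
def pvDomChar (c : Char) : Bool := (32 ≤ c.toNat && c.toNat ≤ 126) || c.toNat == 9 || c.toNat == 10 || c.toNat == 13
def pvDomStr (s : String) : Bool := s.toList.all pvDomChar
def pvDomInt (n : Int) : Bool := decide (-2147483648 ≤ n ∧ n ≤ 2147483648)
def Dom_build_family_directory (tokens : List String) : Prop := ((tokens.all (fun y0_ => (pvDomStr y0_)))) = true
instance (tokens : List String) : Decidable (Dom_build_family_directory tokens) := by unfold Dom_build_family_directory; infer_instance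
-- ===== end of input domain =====

-- B changes A's O(n^3) special-family window scan into an O(n) incremental scan capped at the
-- longest key (29 chars) and builds the joined prefix during the head-noun pass (objective: faster).

-- shared literal data of both Pythons (the same set/dict literals appear in Source A and Source B)
def pv_furniture : List String :=
  ["chair", "sofa", "table", "stool", "bench", "desk", "screen", "pod", "storage", "cabinet", "shelf"]

def pv_plural : List String := ["chair", "sofa", "stool", "bench", "table"]

-- dict lookup in special_families (first matching key; an assoc lookup over the 4 literal pairs)
def pv_special (s : String) : Option String :=
  if s == "eames_molded_plastic_armchair" then some "eames_molded_plastic_chairs"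
  else if s == "motia_sit_to_stand_table" then some "motia_sit_to_stand_tables"
  else if s == "aeron_chair" then some "aeron_chairs"
  else if s == "leeway_stool" then some "leeway_stools"
  else none

-- '_'.join(xs)
def pv_joinU (xs : List String) : String := PySem.Str.join "_" xs

-- ===== PORT A =====
def pv_should_pluralize (h : String) : Bool := pv_plural.contains h

-- the nested 'for i in range(len(tokens)): for j in range(i+1, len(tokens)+1): …' with early return
def aSpecialScan (tokens : List String) : Option String :=
  (List.range tokens.length).findSome? (fun i =>
    (List.range' (i + 1) (tokens.length + 1 - (i + 1))).findSome? (fun (j : Nat) =>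
      pv_special (pv_joinU (PySem.List.slice tokens (some (i : Int)) (some (j : Int))))))

-- 'for i in range(len(tokens) - 2): …' compound-pattern search with early break
def aCompound (tokens : List String) : Option Nat :=
  (List.range (tokens.length - 2)).findSome? (fun i =>
    if tokens.getD i "" == "sit" && tokens.getD (i + 1) "" == "to" &&
       (tokens.getD (i + 2) "" == "stand" || tokens.getD (i + 2) "" == "sit")
    then some (i + 2) else none)

def build_family_directory (tokens : List String) : String :=
  match aSpecialScan tokens with
  | some fam => fam
  | none =>
    let idx : Int :=
      match tokens.findIdx? (fun t => pv_furniture.contains t) with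
      | some i => (i : Int)
      | none =>
        match aCompound tokens with
        | some m => (m : Int)
        | none => min 1 ((tokens.length : Int) - 1)
    let family := pv_joinU (PySem.List.slice tokens (some 0) (some (idx + 1)))
    match PySem.List.pyGet? tokens idx with
    | none => ""   -- tokens[-1] on empty input: IndexError, excluded by Pre_
    | some h => if pv_should_pluralize h then family ++ "s" else family

-- ===== PORT B =====
-- grow one window incrementally; abandon it once it is 29 chars (longest key) or the list ends
def bSpecialWindow (joined : String) : List String → Option String
  | [] =>
    (match pv_special joined with
     | some v => some v
     | none => none)
  | t :: rs =>
    (match pv_special joined with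
     | some v => some v
     | none => if 29 ≤ PySem.Str.len joined then none else bSpecialWindow (joined ++ "_" ++ t) rs)

-- 'for i in range(n): …' over start positions (suffixes)
def bSpecialScan : List String → Option String
  | [] => none
  | t :: rest =>
    match bSpecialWindow t rest with
    | some v => some v
    | none => bSpecialScan rest

-- one forward pass: accumulate the joined prefix while hunting the head noun
def bHeadScan (joined : Option String) : List String → Option String
  | [] => none
  | t :: rest =>
    let j := match joined with | none => t | some s => s ++ "_" ++ t
    if pv_furniture.contains t then
      some (if pv_plural.contains t then j ++ "s" else j)
    else bHeadScan (some j) rest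

-- compound pattern: return the joined prefix directly ('stand'/'sit' is never pluralized)
def bCompound (tokens : List String) : Option String :=
  (List.range (tokens.length - 2)).findSome? (fun i =>
    if tokens.getD i "" == "sit" && tokens.getD (i + 1) "" == "to" &&
       (tokens.getD (i + 2) "" == "stand" || tokens.getD (i + 2) "" == "sit")
    then some (pv_joinU (tokens.take (i + 3))) else none)

def build_family_directory_alt (tokens : List String) : String :=
  match bSpecialScan tokens with
  | some v => v
  | none =>
    match bHeadScan none tokens with
    | some v => v
    | none =>
      match bCompound tokens with
      | some v => v
      | none =>
        let k := min 2 tokens.length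
        let fam := pv_joinU (tokens.take k)
        match PySem.List.pyGet? tokens ((k : Int) - 1) with
        | none => ""   -- tokens[-1] on empty input: IndexError, excluded by Pre_
        | some t => if pv_plural.contains t then fam ++ "s" else fam

-- ===== PRECONDITION & SPEC =====
-- Pre_ excludes only the empty list, on which the Python A raises IndexError (tokens[-1]).
def Pre_build_family_directory (tokens : List String) : Prop := tokens ≠ []
instance (tokens : List String) : Decidable (Pre_build_family_directory tokens) := by
  unfold Pre_build_family_directory; infer_instance

def pvWitness_build_family_directory : List String := ["aeron", "chair"]

def Spec_build_family_directory (tokens : List String) (out : String) : Prop :=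
  out = build_family_directory_alt tokens
instance (tokens : List String) (out : String) : Decidable (Spec_build_family_directory tokens out) := by
  unfold Spec_build_family_directory; infer_instance

-- ===== CLAIM (what is proved, stated in full; the proofs are below) =====
def Claim_equal_build_family_directory : Prop :=
  ∀ (tokens : List String), Dom_build_family_directory tokens →
    Pre_build_family_directory tokens →
    Spec_build_family_directory tokens (build_family_directory tokens)

-- ===== LEMMAS AND PROOFS =====

-- the list of joins of the windows starting at a fixed position: [acc, acc_r0, acc_r0_r1, …]
def joins (acc : String) : List String → List String
  | [] => [acc]
  | t :: rs => acc :: joins (acc ++ "_" ++ t) rs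

-- all windows starting at one position, fed to the special-family lookup
def specialAt : List String → Option String
  | [] => none
  | x :: r => (joins x r).findSome? pv_special

def jacc : Option String → List String → String
  | none, xs => pv_joinU xs
  | some s, xs => s ++ "_" ++ pv_joinU xs

lemma joinU_singleton (x : String) : pv_joinU [x] = x := by
  apply String.toList_inj.mp
  simp [pv_joinU, PySem.Str.toList_join, PySem.Chars.join_singleton]

lemma joinU_cons (x : String) (xs : List String) (h : xs ≠ []) :
    pv_joinU (x :: xs) = x ++ "_" ++ pv_joinU xs := by
  obtain ⟨y, ys, rfl⟩ := List.exists_cons_of_ne_nil h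
  apply String.toList_inj.mp
  simp [pv_joinU, PySem.Str.toList_join, PySem.Chars.join_cons_cons]

lemma findSome?_congr_mem {α β : Type} (l : List α) (f g : α → Option β)
    (h : ∀ a ∈ l, f a = g a) : l.findSome? f = l.findSome? g := by
  induction l with
  | nil => rfl
  | cons a l ih =>
    simp only [List.findSome?_cons, h a (by simp)]
    cases g a with
    | none => exact ih (fun b hb => h b (by simp [hb]))
    | some v => rfl

lemma joins_append (p : String) (rs : List String) : ∀ acc,
    joins (p ++ acc) rs = (joins acc rs).map (p ++ ·) := by
  induction rs with
  | nil => intro acc; simp [joins]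
  | cons t rs ih =>
    intro acc
    simp only [joins, List.map_cons]
    congr 1
    rw [← ih (acc ++ "_" ++ t)]
    congr 1
    simp [String.append_assoc]

lemma map_join_take : ∀ (rest : List String) (x : String),
    (List.range (rest.length + 1)).map (fun m => pv_joinU ((x :: rest).take (m + 1))) = joins x rest := by
  intro rest
  induction rest with
  | nil => intro x; simp [joins, List.range_succ, joinU_singleton]
  | cons t rs ih =>
    intro x
    rw [show (t :: rs).length + 1 = rs.length + 1 + 1 from rfl,
        List.range_succ_eq_map, List.map_cons, List.map_map]
    have step : ((fun m => pv_joinU ((x :: t :: rs).take (m + 1))) ∘ Nat.succ) =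
        fun m => x ++ "_" ++ pv_joinU ((t :: rs).take (m + 1)) := by
      funext m
      show pv_joinU ((x :: t :: rs).take (m + 1 + 1)) = _
      rw [List.take_succ_cons]
      exact joinU_cons x _ (by simp)
    rw [step]
    show pv_joinU ((x :: t :: rs).take (0 + 1)) :: _ = joins x (t :: rs)
    simp only [joins]
    congr 1
    · simpa using joinU_singleton x
    · have hfun : (fun m => x ++ "_" ++ pv_joinU ((t :: rs).take (m + 1))) =
          ((x ++ "_") ++ ·) ∘ (fun m => pv_joinU ((t :: rs).take (m + 1))) := by
        funext m; simp [String.append_assoc]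
      rw [hfun, ← List.map_map, ih t, ← joins_append]

lemma len_le_of_mem_joins : ∀ (rs : List String) (acc e : String), e ∈ joins acc rs →
    acc.toList.length ≤ e.toList.length := by
  intro rs
  induction rs with
  | nil => intro acc e he; simp [joins] at he; simp [he]
  | cons t rs ih =>
    intro acc e he
    simp only [joins, List.mem_cons] at he
    rcases he with rfl | he
    · exact le_refl _
    · calc acc.toList.length ≤ (acc ++ "_" ++ t).toList.length := by
            simp [String.toList_append]
        _ ≤ e.toList.length := ih _ _ he

lemma special_none_of_long (s : String) (h : 29 < s.toList.length) : pv_special s = none := by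
  unfold pv_special
  split_ifs with h1 h2 h3 h4
  · exact absurd h (by rw [eq_of_beq h1]; decide)
  · exact absurd h (by rw [eq_of_beq h2]; decide)
  · exact absurd h (by rw [eq_of_beq h3]; decide)
  · exact absurd h (by rw [eq_of_beq h4]; decide)
  · rfl

lemma windowEq : ∀ (rs : List String) (acc : String),
    bSpecialWindow acc rs = (joins acc rs).findSome? pv_special := by
  intro rs
  induction rs with
  | nil =>
    intro acc
    simp only [bSpecialWindow, joins, List.findSome?_cons, List.findSome?_nil]
    cases pv_special acc <;> rfl
  | cons t rs ih =>
    intro acc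
    simp only [bSpecialWindow, joins, List.findSome?_cons]
    cases hsp : pv_special acc with
    | some v => rfl
    | none =>
      by_cases hlen : 29 ≤ PySem.Str.len acc
      · simp only [if_pos hlen]
        symm
        rw [List.findSome?_eq_none_iff]
        intro e he
        apply special_none_of_long
        have h1 : (acc ++ "_" ++ t).toList.length ≤ e.toList.length :=
          len_le_of_mem_joins _ _ _ he
        have h2 : 29 ≤ acc.toList.length := by
          rw [PySem.Str.len_eq] at hlen; exact_mod_cast hlen
        simp [String.toList_append] at h1 h2 ⊢
        omega
      · simp only [if_neg hlen]
        exact ih _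

lemma innerEq (tokens : List String) (i : Nat) (hi : i < tokens.length) :
    (List.range' (i + 1) (tokens.length + 1 - (i + 1))).findSome? (fun (j : Nat) =>
      pv_special (pv_joinU (PySem.List.slice tokens (some (i : Int)) (some (j : Int))))) =
    specialAt (tokens.drop i) := by
  obtain ⟨x, r, hxr⟩ : ∃ x r, tokens.drop i = x :: r := by
    rcases hd : tokens.drop i with _ | ⟨x, r⟩
    · exact absurd (List.drop_eq_nil_iff.mp hd) (by omega)
    · exact ⟨x, r, rfl⟩
  have hlen : tokens.length + 1 - (i + 1) = r.length + 1 := by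
    have := List.length_drop (l := tokens) (i := i)
    rw [hxr] at this; simp at this; omega
  rw [hlen, List.range'_eq_map_range, List.findSome?_map]
  have key : ((fun j : Nat => pv_special (pv_joinU (PySem.List.slice tokens (some (i : Int)) (some (j : Int))))) ∘ (fun x => i + 1 + x)) =
      fun m => pv_special (pv_joinU ((x :: r).take (m + 1))) := by
    funext m
    show pv_special (pv_joinU (PySem.List.slice tokens (some (i : Int)) (some ((i + 1 + m : Nat) : Int)))) = _
    rw [PySem.List.slice_natCast, show i + 1 + m - i = m + 1 by omega, hxr]
  rw [key, hxr]
  show _ = (joins x r).findSome? pv_special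
  rw [← map_join_take r x, List.findSome?_map]
  rfl

lemma specialEq (tokens : List String) : aSpecialScan tokens = bSpecialScan tokens := by
  unfold aSpecialScan
  rw [findSome?_congr_mem _ _ (fun i => specialAt (tokens.drop i))
      (fun i hi => innerEq tokens i (List.mem_range.mp hi))]
  induction tokens with
  | nil => rfl
  | cons t rest ih =>
    rw [show (t :: rest).length = rest.length + 1 from rfl, List.range_succ_eq_map,
        List.findSome?_cons, List.findSome?_map]
    have hcomp : ((fun i => specialAt ((t :: rest).drop i)) ∘ Nat.succ) =
        fun i => specialAt (rest.drop i) := rfl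
    rw [hcomp, ih]
    rw [List.drop_zero, show specialAt (t :: rest) = bSpecialWindow t rest from (windowEq rest t).symm]
    cases h : bSpecialWindow t rest <;> simp [bSpecialScan, h]

lemma jacc_singleton (acc : Option String) (t : String) :
    jacc acc [t] = (match acc with | none => t | some s => s ++ "_" ++ t) := by
  cases acc <;> simp [jacc, joinU_singleton]

lemma jacc_cons (acc : Option String) (t : String) (xs : List String) (h : xs ≠ []) :
    jacc acc (t :: xs) = jacc (some (jacc acc [t])) xs := by
  cases acc with
  | none => simp [jacc, joinU_cons t xs h, joinU_singleton]
  | some s =>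
    simp [jacc, joinU_cons t xs h, joinU_singleton, String.append_assoc]

lemma headScanEq : ∀ (ts : List String) (acc : Option String),
    bHeadScan acc ts =
      (ts.findIdx? (fun t => pv_furniture.contains t)).map (fun i =>
        let j := jacc acc (ts.take (i + 1))
        if pv_plural.contains (ts.getD i "") then j ++ "s" else j) := by
  intro ts
  induction ts with
  | nil => intro acc; rfl
  | cons t rs ih =>
    intro acc
    rw [List.findIdx?_cons]
    by_cases hp : pv_furniture.contains t
    · simp only [bHeadScan, if_pos hp, Option.map_some]
      rw [List.take_succ_cons, List.take_zero, jacc_singleton]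
      rfl
    · simp only [bHeadScan, if_neg hp, ih]
      cases hfi : rs.findIdx? (fun t => pv_furniture.contains t) with
      | none => rfl
      | some i =>
        have hi : i < rs.length := (List.findIdx?_eq_some_iff_findIdx_eq.mp hfi).1
        have hrs : rs ≠ [] := by intro h; subst h; simp at hi
        have htk : rs.take (i + 1) ≠ [] := by simp [List.take_eq_nil_iff, hrs]
        simp only [Option.map_some, List.take_succ_cons, List.getD_cons_succ]
        rw [jacc_cons acc t _ htk, jacc_singleton]

lemma findSome?_if_map {α : Type} (c : Nat → Bool) (u : Nat → Nat) (v : Nat → α) :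
    ∀ (l : List Nat),
    l.findSome? (fun i => if c i then some (v (u i)) else none) =
      (l.findSome? (fun i => if c i then some (u i) else none)).map v := by
  intro l
  induction l with
  | nil => rfl
  | cons a l ih =>
    simp only [List.findSome?_cons]
    by_cases h : c a
    · simp [h]
    · simp only [if_neg h]; exact ih

lemma compoundEq (tokens : List String) :
    bCompound tokens = (aCompound tokens).map (fun m => pv_joinU (tokens.take (m + 1))) := by
  unfold bCompound aCompound
  exact findSome?_if_map _ (fun i => i + 2) (fun m => pv_joinU (tokens.take (m + 1))) _

-- ===== VERDICT (by name: the statement is the Claim_ definition above) =====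
theorem build_family_directory_spec : Claim_equal_build_family_directory := by
  unfold Claim_equal_build_family_directory
  intro tokens _ hpre
  unfold Spec_build_family_directory
  unfold build_family_directory build_family_directory_alt
  rw [specialEq tokens]
  cases hs : bSpecialScan tokens with
  | some v => rfl
  | none =>
    rw [headScanEq tokens none]
    cases hf : tokens.findIdx? (fun t => pv_furniture.contains t) with
    | some i =>
      have hi : i < tokens.length := (List.findIdx?_eq_some_iff_findIdx_eq.mp hf).1
      have hsl : PySem.List.slice tokens (some 0) (some ((i : Int) + 1)) = tokens.take (i + 1) := by
        rw [show ((i : Int) + 1) = ((i + 1 : Nat) : Int) by push_cast; ring,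
            show (some (0 : Int)) = some ((0 : Nat) : Int) by norm_num,
            PySem.List.slice_natCast]
        simp
      have hget : PySem.List.pyGet? tokens (i : Int) = some (tokens.getD i "") := by
        rw [PySem.List.pyGet?_natCast, List.getElem?_eq_getElem hi, List.getD_eq_getElem _ _ hi]
      simp only [Option.map_some, hsl, hget, pv_should_pluralize, jacc]
    | none =>
      rw [compoundEq tokens]
      cases hc : aCompound tokens with
      | some m =>
        obtain ⟨a, ha, hif⟩ := List.exists_of_findSome?_eq_some hc
        rw [List.mem_range] at ha
        by_cases hcond : (tokens.getD a "" == "sit" && tokens.getD (a + 1) "" == "to" &&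
            (tokens.getD (a + 2) "" == "stand" || tokens.getD (a + 2) "" == "sit")) = true
        case neg => rw [if_neg hcond] at hif; exact absurd hif (by simp)
        rw [if_pos hcond] at hif
        have hm : m = a + 2 := by simpa using hif.symm
        subst hm
        have hmlt : a + 2 < tokens.length := by omega
        have hplural : pv_plural.contains (tokens.getD (a + 2) "") = false := by
          simp only [Bool.and_eq_true, Bool.or_eq_true] at hcond
          rcases hcond.2 with h | h
          · rw [eq_of_beq h]; decide
          · rw [eq_of_beq h]; decide
        have hsl : PySem.List.slice tokens (some 0) (some (((a + 2 : Nat) : Int) + 1)) = tokens.take (a + 2 + 1) := by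
          rw [show (((a + 2 : Nat) : Int) + 1) = ((a + 3 : Nat) : Int) by push_cast; ring,
              show (some (0 : Int)) = some ((0 : Nat) : Int) by norm_num,
              PySem.List.slice_natCast]
          simp
        have hget : PySem.List.pyGet? tokens ((a + 2 : Nat) : Int) = some (tokens.getD (a + 2) "") := by
          rw [PySem.List.pyGet?_natCast, List.getElem?_eq_getElem hmlt, List.getD_eq_getElem _ _ hmlt]
        simp only [Option.map_none, Option.map_some, hsl, hget, pv_should_pluralize, hplural,
          if_false, Bool.false_eq_true]
      | none =>
        rcases tokens with _ | ⟨t, rest⟩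
        · exact absurd rfl hpre
        rcases rest with _ | ⟨r, rs⟩
        · have hidx : min (1 : Int) ((([t] : List String).length : Int) - 1) = 0 := by simp
          have hsl : PySem.List.slice [t] (some 0) (some ((0 : Int) + 1)) = [t] := by
            rw [show ((0 : Int) + 1) = ((1 : Nat) : Int) by norm_num,
                show (some (0 : Int)) = some ((0 : Nat) : Int) by norm_num,
                PySem.List.slice_natCast]
            simp
          have hk : min 2 ([t] : List String).length = 1 := by simp
          simp only [Option.map_none, hidx, hsl, hk, pv_should_pluralize]
          simp [PySem.List.pyGet?, PySem.List.pyIdx?, joinU_singleton]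
        · have hidx : min (1 : Int) (((t :: r :: rs).length : Int) - 1) = 1 := by
            simp only [List.length_cons]; push_cast; omega
          have hsl : PySem.List.slice (t :: r :: rs) (some 0) (some ((1 : Int) + 1)) = (t :: r :: rs).take 2 := by
            rw [show ((1 : Int) + 1) = ((2 : Nat) : Int) by norm_num,
                show (some (0 : Int)) = some ((0 : Nat) : Int) by norm_num,
                PySem.List.slice_natCast]
            simp
          have hk : min 2 (t :: r :: rs).length = 2 := by simp [List.length_cons]
          have hget : PySem.List.pyGet? (t :: r :: rs) (((2 : Nat) : Int) - 1) = some r := by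
            rw [show (((2 : Nat) : Int) - 1) = ((1 : Nat) : Int) by norm_num, PySem.List.pyGet?_natCast]
            rfl
          have hget1 : PySem.List.pyGet? (t :: r :: rs) (1 : Int) = some r := by
            rw [show (1 : Int) = ((1 : Nat) : Int) by norm_num, PySem.List.pyGet?_natCast]
            rfl
          simp only [Option.map_none, hidx, hsl, hk, hget, hget1, pv_should_pluralize]
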